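-- pv_equiv track=rewrite | github.com/mr-asa/comfyui_utils | update_workflow_repos.py | _decode_git_quoted_path
-- ===== SOURCE A (Python) =====
-- from typing import List, Optional, Tuple
--
-- def _decode_git_quoted_path(value: str) -> str:
--     """
--     Decode git's C-style quoted path (used by `git status --porcelain`).
--     Handles octal escapes like \\343\\200\\220 and common escaped chars.
--     """
--     chunks: List[int] = []
--     i = 0
--     while i < len(value):
--         ch = value[i]
--         if ch != "\\":
--             chunks.extend(ch.encode("utf-8", errors="surrogatepass"))
--             i += 1
--             continue
--         if i + 1 >= len(value):
--             chunks.append(ord("\\"))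
--             i += 1
--             continue
--
--         nxt = value[i + 1]
--         # Git uses 3-digit octal escapes for non-ASCII bytes in quoted paths.
--         if i + 3 < len(value) and value[i + 1:i + 4].isdigit() and all(c in "01234567" for c in value[i + 1:i + 4]):
--             chunks.append(int(value[i + 1:i + 4], 8))
--             i += 4
--             continue
--         if nxt == "n":
--             chunks.append(ord("\n"))
--             i += 2
--             continue
--         if nxt == "t":
--             chunks.append(ord("\t"))
--             i += 2
--             continue
--         if nxt in {'\\', '"'}:
--             chunks.append(ord(nxt))
--             i += 2
--             continue
--
--         # Unknown escape: keep literal char after backslash.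
--         chunks.extend(nxt.encode("utf-8", errors="surrogatepass"))
--         i += 2
--
--     return bytes(chunks).decode("utf-8", errors="replace")
-- ===== SOURCE B (Python) =====
-- OCTAL = set("01234567")
--
-- def _decode_git_quoted_path(value: str) -> str:
--     """Decode git's C-style quoted path by streaming characters straight to the
--     output and buffering only the raw bytes of octal escapes, decoding each
--     maximal octal run on its own (instead of encoding every character to bytes
--     and decoding the whole byte string once at the end)."""
--     out = []
--     buf = bytearray()
--     n = len(value)
--     i = 0
--     while i < n:
--         ch = value[i]
--         if ch == "\\" and i + 3 < n and all(c in OCTAL for c in value[i + 1:i + 4]):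
--             buf.append(int(value[i + 1:i + 4], 8))
--             i += 4
--             continue
--         if buf:
--             out.append(buf.decode("utf-8", errors="replace"))
--             buf.clear()
--         if ch == "\\" and i + 1 < n:
--             nxt = value[i + 1]
--             out.append({"n": "\n", "t": "\t"}.get(nxt, nxt))
--             i += 2
--         else:
--             out.append(ch)
--             i += 1
--     if buf:
--         out.append(buf.decode("utf-8", errors="replace"))
--     return "".join(out)
-- ===== Notes on version B (the rewrite author's own statement) =====
-- stated objective: alternative
-- what changed: B streams decoded characters directly into the output and buffers only the raw bytes of octal escapes, UTF-8-decoding each maximal octal run separately, instead of A's strategy of encoding every character to a global byte list and decoding it all at once at the end.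
import Mathlib
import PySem

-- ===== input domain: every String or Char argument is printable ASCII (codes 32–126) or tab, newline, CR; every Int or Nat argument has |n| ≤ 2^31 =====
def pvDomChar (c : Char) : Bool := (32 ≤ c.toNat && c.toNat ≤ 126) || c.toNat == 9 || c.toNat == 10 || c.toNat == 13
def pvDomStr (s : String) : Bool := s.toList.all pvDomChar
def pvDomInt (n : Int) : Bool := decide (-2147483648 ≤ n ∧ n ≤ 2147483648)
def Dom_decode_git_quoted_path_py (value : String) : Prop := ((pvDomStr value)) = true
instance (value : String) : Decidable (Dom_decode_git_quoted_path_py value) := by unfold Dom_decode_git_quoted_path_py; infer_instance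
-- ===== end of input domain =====

-- B streams decoded characters straight to the output and buffers only the raw bytes of
-- octal escapes, decoding each maximal octal run on its own, instead of A's
-- encode-everything-then-decode-once byte list (alternative decomposition, same cost;
-- equivalence is proved on the ASCII input domain Dom).

-- ===== PORT A =====

-- ch.encode("utf-8", errors="surrogatepass"): UTF-8 encoding of one code point.
-- Exact on all non-surrogate code points (Lean's Char carries no surrogates; on the
-- ASCII domain this is the single byte c.toNat).
def utf8enc (c : Char) : List Nat :=
  let n := c.toNat
  if n < 0x80 then [n]
  else if n < 0x800 then [0xC0 + n / 64, 0x80 + n % 64]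
  else if n < 0x10000 then [0xE0 + n / 4096, 0x80 + (n / 64) % 64, 0x80 + n % 64]
  else [0xF0 + n / 262144, 0x80 + (n / 4096) % 64, 0x80 + (n / 64) % 64, 0x80 + n % 64]

def contB (b : Nat) : Bool := 0x80 ≤ b && b ≤ 0xBF

-- bytes(...).decode("utf-8", errors="replace"): CPython's UTF-8 decoder with one
-- U+FFFD per maximal invalid subpart. Exact for byte values 0–255.
def u8dec : List Nat → List Char
  | [] => []
  | b :: bs =>
    if b < 0x80 then Char.ofNat b :: u8dec bs
    else if b < 0xC2 then '\uFFFD' :: u8dec bs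
    else if b < 0xE0 then
      match bs with
      | c1 :: bs1 =>
        if contB c1 then Char.ofNat ((b - 0xC0) * 64 + (c1 - 0x80)) :: u8dec bs1
        else '\uFFFD' :: u8dec (c1 :: bs1)
      | [] => ['\uFFFD']
    else if b < 0xF0 then
      match bs with
      | c1 :: bs1 =>
        if ((if b = 0xE0 then 0xA0 else 0x80) ≤ c1 && c1 ≤ (if b = 0xED then 0x9F else 0xBF)) then
          match bs1 with
          | c2 :: bs2 =>
            if contB c2 then
              Char.ofNat ((b - 0xE0) * 4096 + (c1 - 0x80) * 64 + (c2 - 0x80)) :: u8dec bs2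
            else '\uFFFD' :: u8dec (c2 :: bs2)
          | [] => ['\uFFFD']
        else '\uFFFD' :: u8dec (c1 :: bs1)
      | [] => ['\uFFFD']
    else if b < 0xF5 then
      match bs with
      | c1 :: bs1 =>
        if ((if b = 0xF0 then 0x90 else 0x80) ≤ c1 && c1 ≤ (if b = 0xF4 then 0x8F else 0xBF)) then
          match bs1 with
          | c2 :: bs2 =>
            if contB c2 then
              match bs2 with
              | c3 :: bs3 =>
                if contB c3 then
                  Char.ofNat ((b - 0xF0) * 262144 + (c1 - 0x80) * 4096 + (c2 - 0x80) * 64 + (c3 - 0x80)) :: u8dec bs3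
                else '\uFFFD' :: u8dec (c3 :: bs3)
              | [] => ['\uFFFD']
            else '\uFFFD' :: u8dec (c2 :: bs2)
          | [] => ['\uFFFD']
        else '\uFFFD' :: u8dec (c1 :: bs1)
      | [] => ['\uFFFD']
    else '\uFFFD' :: u8dec bs

-- c in "01234567" (on the ASCII domain A's extra .isdigit() test adds nothing)
def isOct (c : Char) : Bool := '0' ≤ c && c ≤ '7'

def octVal (a b c : Char) : Nat := 64 * (a.toNat - 48) + 8 * (b.toNat - 48) + (c.toNat - 48)

-- A's while loop over the index i, as recursion on the suffix value[i:].
def decA : List Char → List Nat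
  | [] => []
  | c :: rest =>
    if c = '\\' then
      match rest with
      | [] => [92]                          -- i + 1 >= len(value)
      | n :: a :: b :: rest2 =>             -- i + 3 < len(value): octal test possible
        if isOct n && isOct a && isOct b then octVal n a b :: decA rest2
        else if n = 'n' then 10 :: decA (a :: b :: rest2)
        else if n = 't' then 9 :: decA (a :: b :: rest2)
        else if n = '\\' || n = '"' then n.toNat :: decA (a :: b :: rest2)
        else utf8enc n ++ decA (a :: b :: rest2)
      | n :: rest1 =>                       -- fewer than 3 chars after the backslash
        if n = 'n' then 10 :: decA rest1
        else if n = 't' then 9 :: decA rest1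
        else if n = '\\' || n = '"' then n.toNat :: decA rest1
        else utf8enc n ++ decA rest1
    else utf8enc c ++ decA rest

def decode_git_quoted_path_py (value : String) : String :=
  String.ofList (u8dec (decA value.toList))

-- ===== PORT B =====

-- OCTAL = set("01234567"); `c in OCTAL` is membership in these eight characters
-- ===== PORT B =====

-- OCTAL = set("01234567"); `c in OCTAL` is membership in these eight characters
def bOctChars : List Char := ['0', '1', '2', '3', '4', '5', '6', '7']

def bOct (c : Char) : Bool := bOctChars.contains c

-- int(value[i+1:i+4], 8): fold the three octal digits left to right
def bVal (a b c : Char) : Nat :=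
  ((a.toNat - 48) * 8 + (b.toNat - 48)) * 8 + (c.toNat - 48)

-- buf.decode("utf-8", errors="replace"), hand-ported as lead-byte classification:
-- bLead gives (number of continuation bytes, seed accumulator, admitted range of the
-- FIRST continuation byte) for a lead byte, none for an invalid lead (CPython's rules;
-- exact for byte values 0–255); bTake consumes the continuation bytes, returning the
-- unread rest at the offending byte on failure.
def bLead (b : Nat) : Option (Nat × Nat × Nat × Nat) :=
  if b < 0x80 then some (0, b, 0, 0)
  else if b < 0xC2 then none
  else if b < 0xE0 then some (1, b - 0xC0, 0x80, 0xBF)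
  else if b < 0xF0 then
    some (2, b - 0xE0, if b = 0xE0 then 0xA0 else 0x80, if b = 0xED then 0x9F else 0xBF)
  else if b < 0xF5 then
    some (3, b - 0xF0, if b = 0xF0 then 0x90 else 0x80, if b = 0xF4 then 0x8F else 0xBF)
  else none

def bTake : Nat → Nat → Nat → Nat → List Nat → Option Nat × List Nat
  | 0, acc, _, _, bs => (some acc, bs)
  | _ + 1, _, _, _, [] => (none, [])
  | k + 1, acc, lo, hi, b :: bs =>
    if lo ≤ b && b ≤ hi then bTake k (acc * 64 + (b - 0x80)) 0x80 0xBF bs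
    else (none, b :: bs)

theorem bTake_len : ∀ (k acc lo hi : Nat) (bs : List Nat),
    (bTake k acc lo hi bs).2.length ≤ bs.length := by
  intro k
  induction k with
  | zero => intro acc lo hi bs; simp [bTake]
  | succ k ih =>
    intro acc lo hi bs
    cases bs with
    | nil => simp [bTake]
    | cons b bs =>
      by_cases h : (lo ≤ b && b ≤ hi) = true
      · simp only [bTake, h, if_pos]
        exact Nat.le_trans (ih _ _ _ bs) (by simp)
      · simp [bTake, h]

def bDec : List Nat → List Char
  | [] => []
  | b :: bs =>
    match bLead b with
    | none => '\uFFFD' :: bDec bs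
    | some (k, acc, lo, hi) =>
      let r := bTake k acc lo hi bs
      (match r.1 with
       | some cp => Char.ofNat cp
       | none => '\uFFFD') :: bDec r.2
termination_by l => l.length
decreasing_by
  · simp
  · have := bTake_len k acc lo hi bs; simp; omega

-- {"n": "\n", "t": "\t"}.get(nxt, nxt)
def bEsc (a : Char) : Char := if a = 'n' then '\n' else if a = 't' then '\t' else a

-- Source B's while loop: state = (remaining input, pending octal bytes `buf`);
-- `if buf: out.append(buf.decode(...))` is the flush prefix of each non-octal step.
def bLoop : List Char → List Nat → List Char
  | [], buf => if buf.isEmpty then [] else bDec buf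
  | ch :: rest, buf =>
    if ch = '\\' then
      match rest with
      | a :: b :: c :: rest2 =>            -- i + 3 < n: the octal test is possible
        if bOct a && bOct b && bOct c then bLoop rest2 (buf ++ [bVal a b c])
        else (if buf.isEmpty then [] else bDec buf) ++ bEsc a :: bLoop (b :: c :: rest2) []
      | a :: rest1 =>                      -- i + 1 < n but no room for octal
        (if buf.isEmpty then [] else bDec buf) ++ bEsc a :: bLoop rest1 []
      | [] =>                              -- trailing lone backslash: plain-char branch
        (if buf.isEmpty then [] else bDec buf) ++ '\\' :: bLoop [] []
    else (if buf.isEmpty then [] else bDec buf) ++ ch :: bLoop rest []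
termination_by l _ => l.length
decreasing_by
  all_goals simp
  all_goals omega

def decode_git_quoted_path_py_alt (value : String) : String :=
  String.ofList (bLoop value.toList [])

-- ===== PRECONDITION & SPEC =====

-- Both A and B raise ValueError (a byte out of range(0, 256)) exactly when the string
-- contains an effective octal escape \400-\777: a backslash preceded by an even number
-- of consecutive backslashes and followed by three octal digits the first of which is
-- >= '4'. Pre_ excludes exactly those inputs; A returns on every input admitted.
def pvBadAt (l : List Char) (j : Nat) : Bool :=
  match l.drop j with
  | '\\' :: a :: b :: c :: _ =>
    isOct a && isOct b && isOct c && decide ('4' ≤ a) &&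
      ((((l.take j).reverse.takeWhile (fun d => d = '\\')).length) % 2 == 0)
  | _ => false

def Pre_decode_git_quoted_path_py (value : String) : Prop :=
  ∀ j ∈ List.range value.toList.length, pvBadAt value.toList j = false

instance (value : String) : Decidable (Pre_decode_git_quoted_path_py value) := by
  unfold Pre_decode_git_quoted_path_py; infer_instance

def pvWitness_decode_git_quoted_path_py : String := "\\343\\200\\220 \\\"a\\tb\\\\"

def Spec_decode_git_quoted_path_py (value : String) (out : String) : Prop :=
  out = decode_git_quoted_path_py_alt value
instance (value : String) (out : String) : Decidable (Spec_decode_git_quoted_path_py value out) := by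
  unfold Spec_decode_git_quoted_path_py; infer_instance

-- ===== CLAIM (what is proved, stated in full; the proofs are below) =====
def Claim_equal_decode_git_quoted_path_py : Prop := ∀ (value : String), Dom_decode_git_quoted_path_py value → Pre_decode_git_quoted_path_py value → Spec_decode_git_quoted_path_py value (decode_git_quoted_path_py value)

-- ===== LEMMAS AND PROOFS =====

theorem u8dec_cons (b : Nat) (bs : List Nat) :
    u8dec (b :: bs) =
    (if b < 0x80 then Char.ofNat b :: u8dec bs
    else if b < 0xC2 then '\uFFFD' :: u8dec bs
    else if b < 0xE0 then
      match bs with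
      | c1 :: bs1 =>
        if contB c1 then Char.ofNat ((b - 0xC0) * 64 + (c1 - 0x80)) :: u8dec bs1
        else '\uFFFD' :: u8dec (c1 :: bs1)
      | [] => ['\uFFFD']
    else if b < 0xF0 then
      match bs with
      | c1 :: bs1 =>
        if ((if b = 0xE0 then 0xA0 else 0x80) ≤ c1 && c1 ≤ (if b = 0xED then 0x9F else 0xBF)) then
          match bs1 with
          | c2 :: bs2 =>
            if contB c2 then
              Char.ofNat ((b - 0xE0) * 4096 + (c1 - 0x80) * 64 + (c2 - 0x80)) :: u8dec bs2
            else '\uFFFD' :: u8dec (c2 :: bs2)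
          | [] => ['\uFFFD']
        else '\uFFFD' :: u8dec (c1 :: bs1)
      | [] => ['\uFFFD']
    else if b < 0xF5 then
      match bs with
      | c1 :: bs1 =>
        if ((if b = 0xF0 then 0x90 else 0x80) ≤ c1 && c1 ≤ (if b = 0xF4 then 0x8F else 0xBF)) then
          match bs1 with
          | c2 :: bs2 =>
            if contB c2 then
              match bs2 with
              | c3 :: bs3 =>
                if contB c3 then
                  Char.ofNat ((b - 0xF0) * 262144 + (c1 - 0x80) * 4096 + (c2 - 0x80) * 64 + (c3 - 0x80)) :: u8dec bs3
                else '\uFFFD' :: u8dec (c3 :: bs3)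
              | [] => ['\uFFFD']
            else '\uFFFD' :: u8dec (c2 :: bs2)
          | [] => ['\uFFFD']
        else '\uFFFD' :: u8dec (c1 :: bs1)
      | [] => ['\uFFFD']
    else '\uFFFD' :: u8dec bs) := by
  rw [u8dec.eq_def]

theorem u8dec_cons_low {d : Nat} (h : d < 0x80) (bs : List Nat) :
    u8dec (d :: bs) = Char.ofNat d :: u8dec bs := by
  rw [u8dec_cons]; simp [h]

theorem bOct_eq (c : Char) : bOct c = isOct c := by
  rw [Bool.eq_iff_iff]
  simp only [bOct, bOctChars, isOct, List.contains_cons, List.contains_nil,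
    Bool.or_eq_true, Bool.and_eq_true, beq_iff_eq, decide_eq_true_eq, Bool.or_false]
  constructor
  · rintro (h|h|h|h|h|h|h|h) <;> subst h <;> exact ⟨by decide, by decide⟩
  · rintro ⟨h1, h2⟩
    have l1 : 48 ≤ c.toNat := h1
    have l2 : c.toNat ≤ 55 := h2
    have hc : c = Char.ofNat c.toNat := (Char.ofNat_toNat c).symm
    have : c.toNat = 48 ∨ c.toNat = 49 ∨ c.toNat = 50 ∨ c.toNat = 51 ∨ c.toNat = 52 ∨
        c.toNat = 53 ∨ c.toNat = 54 ∨ c.toNat = 55 := by omega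
    rcases this with h|h|h|h|h|h|h|h <;> rw [hc, h] <;> simp
theorem bVal_eq (a b c : Char) : bVal a b c = octVal a b c := by
  unfold bVal octVal; omega

theorem bDec_cons (b : Nat) (bs : List Nat) :
    bDec (b :: bs) =
    (match bLead b with
    | none => '\uFFFD' :: bDec bs
    | some (k, acc, lo, hi) =>
      let r := bTake k acc lo hi bs
      (match r.1 with
       | some cp => Char.ofNat cp
       | none => '\uFFFD') :: bDec r.2) := by
  rw [bDec.eq_def]

theorem bDec_nil : bDec [] = [] := by rw [bDec.eq_def]

theorem bDec_eq_u8dec : ∀ (n : Nat) (bs : List Nat), bs.length ≤ n → bDec bs = u8dec bs := by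
  intro n
  induction n with
  | zero =>
    intro bs h
    have : bs = [] := List.eq_nil_of_length_eq_zero (Nat.le_zero.mp h)
    subst this; rw [bDec_nil]; rfl
  | succ n ih =>
    intro bs h
    cases bs with
    | nil => rw [bDec_nil]; rfl
    | cons b bs =>
      have hbs : bs.length ≤ n := by simp at h; omega
      rw [bDec_cons, u8dec_cons]
      by_cases h0 : b < 0x80
      · simp [bLead, h0, bTake, ih bs hbs]
      · by_cases h1 : b < 0xC2
        · simp [bLead, h0, h1, ih bs hbs]
        · by_cases h2 : b < 0xE0
          · -- two-byte sequences
            simp only [bLead, h0, h1, h2, if_pos, if_false]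
            cases bs with
            | nil => simp [bTake, bDec_nil]
            | cons c1 bs1 =>
              have hbs1 : bs1.length ≤ n := by simp at hbs; omega
              rcases Bool.eq_false_or_eq_true (decide (0x80 ≤ c1) && decide (c1 ≤ 0xBF)) with hc | hc <;>
                simp [bTake, contB, hc, ih (c1 :: bs1) hbs, ih bs1 hbs1]
          · by_cases h3 : b < 0xF0
            · -- three-byte sequences
              simp only [bLead, h0, h1, h2, h3, if_pos, if_false]
              cases bs with
              | nil => simp [bTake, bDec_nil]
              | cons c1 bs1 =>
                have hbs1 : bs1.length ≤ n := by simp at hbs; omega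
                rcases Bool.eq_false_or_eq_true
                  (decide ((if b = 0xE0 then 0xA0 else 0x80) ≤ c1) && decide (c1 ≤ if b = 0xED then 0x9F else 0xBF)) with hc | hc
                · cases bs1 with
                  | nil => simp [bTake, hc, bDec_nil]
                  | cons c2 bs2 =>
                    have hbs2 : bs2.length ≤ n := by simp at hbs1; omega
                    have harith : ((b - 0xE0) * 64 + (c1 - 0x80)) * 64 + (c2 - 0x80)
                        = (b - 0xE0) * 4096 + (c1 - 0x80) * 64 + (c2 - 0x80) := by omega
                    rcases Bool.eq_false_or_eq_true (decide (0x80 ≤ c2) && decide (c2 ≤ 0xBF)) with hd | hd <;>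
                      simp [bTake, hc, contB, hd, harith, ih (c2 :: bs2) hbs1, ih bs2 hbs2]
                · simp [bTake, hc, ih (c1 :: bs1) hbs]
            · by_cases h4 : b < 0xF5
              · -- four-byte sequences
                simp only [bLead, h0, h1, h2, h3, h4, if_pos, if_false]
                cases bs with
                | nil => simp [bTake, bDec_nil]
                | cons c1 bs1 =>
                  have hbs1 : bs1.length ≤ n := by simp at hbs; omega
                  rcases Bool.eq_false_or_eq_true
                    (decide ((if b = 0xF0 then 0x90 else 0x80) ≤ c1) && decide (c1 ≤ if b = 0xF4 then 0x8F else 0xBF)) with hc | hc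
                  · cases bs1 with
                    | nil => simp [bTake, hc, bDec_nil]
                    | cons c2 bs2 =>
                      have hbs2 : bs2.length ≤ n := by simp at hbs1; omega
                      rcases Bool.eq_false_or_eq_true (decide (0x80 ≤ c2) && decide (c2 ≤ 0xBF)) with hd | hd
                      · cases bs2 with
                        | nil => simp [bTake, hc, contB, hd, bDec_nil]
                        | cons c3 bs3 =>
                          have hbs3 : bs3.length ≤ n := by simp at hbs2; omega
                          have harith : (((b - 0xF0) * 64 + (c1 - 0x80)) * 64 + (c2 - 0x80)) * 64 + (c3 - 0x80)
                              = (b - 0xF0) * 262144 + (c1 - 0x80) * 4096 + (c2 - 0x80) * 64 + (c3 - 0x80) := by omega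
                          rcases Bool.eq_false_or_eq_true (decide (0x80 ≤ c3) && decide (c3 ≤ 0xBF)) with he | he <;>
                            simp [bTake, hc, contB, hd, he, harith, ih (c3 :: bs3) hbs2, ih bs3 hbs3]
                      · simp [bTake, hc, contB, hd, ih (c2 :: bs2) hbs1]
                  · simp [bTake, hc, ih (c1 :: bs1) hbs]
              · simp [bLead, h0, h1, h2, h3, h4, ih bs hbs]
theorem u8dec_nil : u8dec [] = [] := rfl

theorem u8dec_append_low : ∀ (n : Nat) (buf : List Nat), buf.length ≤ n →
    ∀ (d : Nat) (bs : List Nat), d < 0x80 →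
    u8dec (buf ++ d :: bs) = u8dec buf ++ u8dec (d :: bs) := by
  intro n
  induction n with
  | zero =>
    intro buf h d bs hd
    have : buf = [] := List.eq_nil_of_length_eq_zero (Nat.le_zero.mp h)
    subst this; simp [u8dec_nil]
  | succ n ih =>
    intro buf h d bs hd
    cases buf with
    | nil => simp [u8dec_nil]
    | cons b tl =>
      have htl : tl.length ≤ n := by simp at h; omega
      have hdc : (decide (0x80 ≤ d) && decide (d ≤ 0xBF)) = false := by simp; omega
      have hde : ∀ x y : Nat, 0x80 ≤ y → ((decide ((if b = x then y else 0x80) ≤ d)) = false) := by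
        intro x y hy; split <;> simp <;> omega
      rw [List.cons_append, u8dec_cons, u8dec_cons]
      by_cases h0 : b < 0x80
      · simp [h0, ih tl htl d bs hd]
      · by_cases h1 : b < 0xC2
        · simp [h0, h1, ih tl htl d bs hd]
        · by_cases h2 : b < 0xE0
          · -- two-byte lead
            simp only [h0, h1, h2]
            cases tl with
            | nil => simp [contB, hdc]
            | cons c1 tl1 =>
              have htl1 : tl1.length ≤ n := by simp at htl; omega
              rcases Bool.eq_false_or_eq_true (contB c1) with hc | hc <;>
                simp [hc, ih tl1 htl1 d bs hd, (show u8dec (c1 :: (tl1 ++ d :: bs)) = u8dec (c1 :: tl1) ++ u8dec (d :: bs) by simpa using ih (c1 :: tl1) htl d bs hd)]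
          · by_cases h3 : b < 0xF0
            · -- three-byte lead
              simp only [h0, h1, h2, h3]
              cases tl with
              | nil =>
                have : (decide ((if b = 0xE0 then 0xA0 else 0x80) ≤ d) &&
                    decide (d ≤ if b = 0xED then 0x9F else 0xBF)) = false := by
                  rw [hde 0xE0 0xA0 (by omega)]; rfl
                simp [this]
              | cons c1 tl1 =>
                have htl1 : tl1.length ≤ n := by simp at htl; omega
                rcases Bool.eq_false_or_eq_true
                  (decide ((if b = 0xE0 then 0xA0 else 0x80) ≤ c1) && decide (c1 ≤ if b = 0xED then 0x9F else 0xBF)) with hc | hc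
                · cases tl1 with
                  | nil => simp [hc, contB, hdc]
                  | cons c2 tl2 =>
                    have htl2 : tl2.length ≤ n := by simp at htl1; omega
                    rcases Bool.eq_false_or_eq_true (contB c2) with he | he <;>
                      simp [hc, he, ih tl2 htl2 d bs hd, (show u8dec (c2 :: (tl2 ++ d :: bs)) = u8dec (c2 :: tl2) ++ u8dec (d :: bs) by simpa using ih (c2 :: tl2) htl1 d bs hd)]
                · simp [hc, (show u8dec (c1 :: (tl1 ++ d :: bs)) = u8dec (c1 :: tl1) ++ u8dec (d :: bs) by simpa using ih (c1 :: tl1) htl d bs hd)]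
            · by_cases h4 : b < 0xF5
              · -- four-byte lead
                simp only [h0, h1, h2, h3, h4]
                cases tl with
                | nil =>
                  have : (decide ((if b = 0xF0 then 0x90 else 0x80) ≤ d) &&
                      decide (d ≤ if b = 0xF4 then 0x8F else 0xBF)) = false := by
                    rw [hde 0xF0 0x90 (by omega)]; rfl
                  simp [this]
                | cons c1 tl1 =>
                  have htl1 : tl1.length ≤ n := by simp at htl; omega
                  rcases Bool.eq_false_or_eq_true
                    (decide ((if b = 0xF0 then 0x90 else 0x80) ≤ c1) && decide (c1 ≤ if b = 0xF4 then 0x8F else 0xBF)) with hc | hc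
                  · cases tl1 with
                    | nil => simp [hc, contB, hdc]
                    | cons c2 tl2 =>
                      have htl2 : tl2.length ≤ n := by simp at htl1; omega
                      rcases Bool.eq_false_or_eq_true (contB c2) with he | he
                      · cases tl2 with
                        | nil =>
                          have hq : 128 ≤ c2 ∧ c2 ≤ 191 := by simpa [contB] using he
                          simp [hc, hq.1, hq.2, contB, hdc]
                        | cons c3 tl3 =>
                          have htl3 : tl3.length ≤ n := by simp at htl2; omega
                          rcases Bool.eq_false_or_eq_true (contB c3) with hf | hf <;>
                            simp [hc, he, hf, ih tl3 htl3 d bs hd, (show u8dec (c3 :: (tl3 ++ d :: bs)) = u8dec (c3 :: tl3) ++ u8dec (d :: bs) by simpa using ih (c3 :: tl3) htl2 d bs hd)]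
                      · simp [hc, he, (show u8dec (c2 :: (tl2 ++ d :: bs)) = u8dec (c2 :: tl2) ++ u8dec (d :: bs) by simpa using ih (c2 :: tl2) htl1 d bs hd)]
                  · simp [hc, (show u8dec (c1 :: (tl1 ++ d :: bs)) = u8dec (c1 :: tl1) ++ u8dec (d :: bs) by simpa using ih (c1 :: tl1) htl d bs hd)]
              · simp [h0, h1, h2, h3, h4, ih tl htl d bs hd]
theorem bLoop_nil (buf : List Nat) :
    bLoop [] buf = if buf.isEmpty then [] else bDec buf := by rw [bLoop.eq_def]

theorem bLoop_esc0 (buf : List Nat) :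
    bLoop ['\\'] buf = (if buf.isEmpty then [] else bDec buf) ++ '\\' :: bLoop [] [] := by
  rw [bLoop.eq_def]; rfl

theorem bLoop_esc1 (a : Char) (buf : List Nat) :
    bLoop ['\\', a] buf = (if buf.isEmpty then [] else bDec buf) ++ bEsc a :: bLoop [] [] := by
  rw [bLoop.eq_def]; rfl

theorem bLoop_esc2 (a b : Char) (buf : List Nat) :
    bLoop ['\\', a, b] buf = (if buf.isEmpty then [] else bDec buf) ++ bEsc a :: bLoop [b] [] := by
  rw [bLoop.eq_def]; rfl

theorem bLoop_esc3 (a b c : Char) (rest2 : List Char) (buf : List Nat) :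
    bLoop ('\\' :: a :: b :: c :: rest2) buf =
      (if bOct a && bOct b && bOct c then bLoop rest2 (buf ++ [bVal a b c])
      else (if buf.isEmpty then [] else bDec buf) ++ bEsc a :: bLoop (b :: c :: rest2) []) := by
  rw [bLoop.eq_def]; rfl

theorem bLoop_plain {ch : Char} (hch : ¬(ch = '\\')) (rest : List Char) (buf : List Nat) :
    bLoop (ch :: rest) buf = (if buf.isEmpty then [] else bDec buf) ++ ch :: bLoop rest [] := by
  rw [bLoop.eq_def]
  split
  next hh => exact absurd hh (by simp)
  next heq =>
    injection heq with e1 e2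
    subst e1; subst e2
    rw [if_neg hch]

theorem flush_eq (buf : List Nat) : (if buf.isEmpty then [] else bDec buf) = u8dec buf := by
  cases buf with
  | nil => rfl
  | cons b bs => simp [bDec_eq_u8dec (b :: bs).length (b :: bs) Nat.le.refl]

theorem dom_low {c : Char} (h : pvDomChar c = true) : c.toNat < 0x80 := by
  simp [pvDomChar] at h; omega

theorem dom_enc {c : Char} (h : pvDomChar c = true) : utf8enc c = [c.toNat] := by
  have := dom_low h; simp [utf8enc]; omega

theorem ofNat_toNat (c : Char) : Char.ofNat c.toNat = c := by
  simp [Char.ofNat_toNat]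

theorem step_low (buf : List Nat) (d : Nat) (hd : d < 0x80) (rest : List Nat) :
    u8dec (buf ++ d :: rest) = u8dec buf ++ Char.ofNat d :: u8dec rest := by
  rw [u8dec_append_low buf.length buf Nat.le.refl d rest hd, u8dec_cons_low hd]

theorem decA_cons_ne {c : Char} (h : ¬(c = '\\')) (rest : List Char) :
    decA (c :: rest) = utf8enc c ++ decA rest := by
  cases rest with
  | nil => simp [decA, h]
  | cons n r1 =>
    cases r1 with
    | nil => simp [decA, h]
    | cons a r2 =>
      cases r2 with
      | nil => simp [decA, h]
      | cons b r3 => simp [decA, h]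

theorem bEsc_ofNat (a : Char) :
    bEsc a = Char.ofNat (if a = 'n' then 10 else if a = 't' then 9 else a.toNat) := by
  by_cases h1 : a = 'n'
  · subst h1; decide
  · by_cases h2 : a = 't'
    · subst h2; decide
    · simp [bEsc, h1, h2]

theorem bLoop_eq : ∀ (n : Nat) (l : List Char), l.length ≤ n → l.all pvDomChar = true →
    ∀ buf : List Nat, bLoop l buf = u8dec (buf ++ decA l) := by
  intro n
  induction n with
  | zero =>
    intro l h _ buf
    have : l = [] := List.eq_nil_of_length_eq_zero (Nat.le_zero.mp h)
    subst this
    rw [bLoop_nil, flush_eq]; simp [decA]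
  | succ n ih =>
    intro l h hdom buf
    cases l with
    | nil => rw [bLoop_nil, flush_eq]; simp [decA]
    | cons ch rest =>
      have hrest : rest.length ≤ n := by simp at h; omega
      have hdch : pvDomChar ch = true := by simp at hdom; exact hdom.1
      have hdrest : rest.all pvDomChar = true := by simp_all
      by_cases hch : ch = '\\'
      · subst hch
        cases rest with
        | nil =>
          rw [bLoop_esc0, bLoop_nil, flush_eq]
          simp only [List.isEmpty_nil, if_pos]
          have : decA ['\\'] = [92] := by simp [decA]
          rw [this, step_low buf 92 (by omega) []]
          rfl
        | cons a rest1 =>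
          have hda : pvDomChar a = true := by simp at hdrest; exact hdrest.1
          have hla : a.toNat < 0x80 := dom_low hda
          -- the common non-octal escape step
          have escstep : ∀ tail : List Char, tail.length ≤ n → tail.all pvDomChar = true →
              (if buf.isEmpty then [] else bDec buf) ++ bEsc a :: bLoop tail [] =
              u8dec (buf ++ ((if a = 'n' then 10 else if a = 't' then 9 else a.toNat) :: decA tail)) := by
            intro tail htn htd
            have hd : (if a = 'n' then (10:Nat) else if a = 't' then 9 else a.toNat) < 0x80 := by
              by_cases h1 : a = 'n' <;> by_cases h2 : a = 't' <;> simp [h1, h2] ; omega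
            rw [step_low buf _ hd, flush_eq, ← bEsc_ofNat a]
            have := ih tail htn htd []
            simp at this
            rw [this]
          cases rest1 with
          | nil =>
            have hA : decA ['\\', a] = (if a = 'n' then 10 else if a = 't' then 9 else a.toNat) :: decA [] := by
              by_cases h1 : a = 'n'
              · simp [decA, h1]
              · by_cases h2 : a = 't'
                · simp [decA, h2]
                · by_cases h3 : a = '\\' ∨ a = '"'
                  · rcases h3 with h3 | h3 <;> simp [decA, h3]
                  · have h31 : ¬(a = '\\') := fun hh => h3 (Or.inl hh)
                    have h32 : ¬(a = '"') := fun hh => h3 (Or.inr hh)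
                    simp [decA, h1, h2, h31, h32, dom_enc hda]
            rw [bLoop_esc1, hA]
            exact escstep [] (by simp) (by simp)
          | cons b rest2 =>
            have hdb : pvDomChar b = true := by simp at hdrest; exact hdrest.2.1
            cases rest2 with
            | nil =>
              have hA : decA ['\\', a, b] =
                  (if a = 'n' then 10 else if a = 't' then 9 else a.toNat) :: decA [b] := by
                by_cases h1 : a = 'n'
                · simp [decA, h1]
                · by_cases h2 : a = 't'
                  · simp [decA, h2]
                  · by_cases h3 : a = '\\' ∨ a = '"'
                    · rcases h3 with h3 | h3 <;> simp [decA, h3]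
                    · have h31 : ¬(a = '\\') := fun hh => h3 (Or.inl hh)
                      have h32 : ¬(a = '"') := fun hh => h3 (Or.inr hh)
                      have hu : decA ('\\' :: [a, b]) = utf8enc a ++ decA [b] := by
                        simp [decA, h1, h2, h31, h32]
                      rw [hu, dom_enc hda]; simp [h1, h2]
              rw [bLoop_esc2, hA]
              exact escstep [b] (by simp at h ⊢; omega) (by simp [hdb])
            | cons c rest3 =>
              rw [bLoop_esc3, bOct_eq, bOct_eq, bOct_eq]
              rcases Bool.eq_false_or_eq_true (isOct a && isOct b && isOct c) with hoct | hoct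
              · -- octal escape
                have hA : decA ('\\' :: a :: b :: c :: rest3) = octVal a b c :: decA rest3 := by
                  simp [decA, hoct]
                rw [hA, hoct, if_pos rfl]
                have hr3 : rest3.length ≤ n := by simp at h; omega
                have hd3 : rest3.all pvDomChar = true := by simp_all
                rw [ih rest3 hr3 hd3 (buf ++ [bVal a b c]), bVal_eq]
                simp
              · -- not an octal escape
                have hA : decA ('\\' :: a :: b :: c :: rest3) =
                    (if a = 'n' then 10 else if a = 't' then 9 else a.toNat) :: decA (b :: c :: rest3) := by
                  by_cases h1 : a = 'n'
                  · subst h1; simp [decA, (by decide : isOct 'n' = false)]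
                  · by_cases h2 : a = 't'
                    · subst h2; simp [decA, (by decide : isOct 't' = false)]
                    · by_cases h3 : a = '\\' ∨ a = '"'
                      · rcases h3 with h3 | h3 <;> subst h3 <;>
                          simp [decA, (by decide : isOct '\\' = false), (by decide : isOct '"' = false)]
                      · have h31 : ¬(a = '\\') := fun hh => h3 (Or.inl hh)
                        have h32 : ¬(a = '"') := fun hh => h3 (Or.inr hh)
                        have hu : decA ('\\' :: a :: b :: c :: rest3) = utf8enc a ++ decA (b :: c :: rest3) := by
                          simp [decA, hoct, h1, h2, h31, h32]
                        rw [hu, dom_enc hda]; simp [h1, h2]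
                rw [hA, hoct]
                simp only [Bool.false_eq_true, if_false]
                exact escstep (b :: c :: rest3) (by simp at h ⊢; omega) (by simp_all)
      · -- plain character
        rw [bLoop_plain hch, decA_cons_ne hch, dom_enc hdch, flush_eq]
        have hih := ih rest hrest hdrest []
        simp at hih
        rw [hih]
        have hs : u8dec (buf ++ ([ch.toNat] ++ decA rest)) = u8dec buf ++ Char.ofNat ch.toNat :: u8dec (decA rest) := by
          rw [List.singleton_append, step_low buf ch.toNat (dom_low hdch) (decA rest)]
        rw [hs, ofNat_toNat]

-- ===== VERDICT (by name: the statement is the Claim_ definition above) =====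
theorem decode_git_quoted_path_py_spec : Claim_equal_decode_git_quoted_path_py := by
  intro value hdom _
  unfold Spec_decode_git_quoted_path_py decode_git_quoted_path_py decode_git_quoted_path_py_alt
  have h := bLoop_eq value.toList.length value.toList Nat.le.refl hdom []
  simp only [List.nil_append] at h
  rw [h]
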